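-- pv_equiv track=rewrite | github.com/NoJeong/TIL | ALGORITHM/210617/프로그래머스 순위검색.py | calc
-- ===== SOURCE A (Python) =====
-- import bisect
--
-- language = ['cpp', 'java', 'python']
--
-- part = ['backend', 'frontend']
--
-- career = ['junior', 'senior']
--
-- food = ['chicken', 'pizza']
--
-- def calc(sorted_info, a, b, c, d, e):
--     cnt = 0
--     if a == '-':
--         for item in language:
--             cnt += calc(sorted_info, item, b, c, d, e)
--     elif b == '-':
--         for item in part:
--             cnt += calc(sorted_info, a, item, c, d, e)
--     elif c == '-':
--         for item in career:
--             cnt += calc(sorted_info, a, b, item, d, e)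
--     elif d == '-':
--         for item in food:
--             cnt += calc(sorted_info, a, b, c, item, e)
--     else:
--         index = bisect.bisect_left(sorted_info[a][b][c][d], e)
--         cnt = len(sorted_info[a][b][c][d]) - index
--
--     return cnt
-- ===== SOURCE B (Python) =====
-- import bisect
--
-- language = ['cpp', 'java', 'python']
--
-- part = ['backend', 'frontend']
--
-- career = ['junior', 'senior']
--
-- food = ['chicken', 'pizza']
--
--
-- def calc(sorted_info, a, b, c, d, e):
--     la = language if a == '-' else [a]
--     lb = part if b == '-' else [b]
--     lc = career if c == '-' else [c]
--     ld = food if d == '-' else [d]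
--     cnt = 0
--     for x in la:
--         for y in lb:
--             for z in lc:
--                 for w in ld:
--                     arr = sorted_info[x][y][z][w]
--                     cnt += len(arr) - bisect.bisect_left(arr, e)
--     return cnt
-- ===== Notes on version B (the rewrite author's own statement) =====
-- stated objective: simpler
-- what changed: Replaces A's recursive wildcard expansion (a recursion tree re-entering calc once per '-' argument) by computing the four candidate lists up front and making one flat pass of nested loops over their Cartesian product, with the same bisect at each leaf.
import Mathlib
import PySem

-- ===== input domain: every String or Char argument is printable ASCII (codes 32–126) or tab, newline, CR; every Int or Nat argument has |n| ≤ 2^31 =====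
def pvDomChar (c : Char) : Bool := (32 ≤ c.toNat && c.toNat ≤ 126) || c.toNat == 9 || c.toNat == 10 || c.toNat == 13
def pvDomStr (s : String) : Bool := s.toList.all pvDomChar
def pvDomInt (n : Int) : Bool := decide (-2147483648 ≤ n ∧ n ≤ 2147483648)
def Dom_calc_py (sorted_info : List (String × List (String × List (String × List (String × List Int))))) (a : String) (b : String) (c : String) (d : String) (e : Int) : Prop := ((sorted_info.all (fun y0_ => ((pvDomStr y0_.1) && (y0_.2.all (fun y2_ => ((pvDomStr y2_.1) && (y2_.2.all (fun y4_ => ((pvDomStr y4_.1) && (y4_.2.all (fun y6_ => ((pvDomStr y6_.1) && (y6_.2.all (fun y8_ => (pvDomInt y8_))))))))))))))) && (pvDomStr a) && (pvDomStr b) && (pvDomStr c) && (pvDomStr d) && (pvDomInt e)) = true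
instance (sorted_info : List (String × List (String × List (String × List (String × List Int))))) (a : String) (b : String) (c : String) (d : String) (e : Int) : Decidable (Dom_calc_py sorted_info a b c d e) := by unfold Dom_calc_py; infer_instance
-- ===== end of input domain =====

-- B replaces A's recursive wildcard expansion by candidate lists and one flat nested pass (objective: simpler; equal cost).

-- the module-level constant lists (shared Python context of both programs)
def pvLanguage : List String := ["cpp", "java", "python"]
def pvPart : List String := ["backend", "frontend"]
def pvCareer : List String := ["junior", "senior"]
def pvFood : List String := ["chicken", "pizza"]

-- sorted_info[x][y][z][w]: four chained dict accesses (first-match association lookup);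
-- `none` is exactly where Python raises KeyError (excluded by Pre_).
def pvLeafList? (si : List (String × List (String × List (String × List (String × List Int))))) (x y z w : String) : Option (List Int) :=
  (si.lookup x).bind fun t => (t.lookup y).bind fun u => (u.lookup z).bind fun v => v.lookup w

-- len(sorted_info[x][y][z][w]) - bisect.bisect_left(sorted_info[x][y][z][w], e); the same expression in both Pythons.
-- The `none` branch (KeyError in Python) is outside Pre_; 0 is an arbitrary total-ization value.
def pvLeafCount (si : List (String × List (String × List (String × List (String × List Int))))) (x y z w : String) (e : Int) : Int :=
  match pvLeafList? si x y z w with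
  | some lst => (lst.length : Int) - (PySem.List.bisectLeft lst e : Int)
  | none => 0

-- ===== PORT A =====
-- A's recursion: each call strictly decreases the number of '-' arguments (≤ 4), so fuel 5 is exact
-- (the fuel-0 branch is unreachable; fuel is only a totalization guard).
def pvCalcA (fuel : Nat) (si : List (String × List (String × List (String × List (String × List Int))))) (a b c d : String) (e : Int) : Int :=
  match fuel with
  | 0 => 0
  | fuel + 1 =>
    if a = "-" then pvLanguage.foldl (fun cnt item => cnt + pvCalcA fuel si item b c d e) 0
    else if b = "-" then pvPart.foldl (fun cnt item => cnt + pvCalcA fuel si a item c d e) 0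
    else if c = "-" then pvCareer.foldl (fun cnt item => cnt + pvCalcA fuel si a b item d e) 0
    else if d = "-" then pvFood.foldl (fun cnt item => cnt + pvCalcA fuel si a b c item e) 0
    else pvLeafCount si a b c d e

def calc_py (sorted_info : List (String × List (String × List (String × List (String × List Int))))) (a : String) (b : String) (c : String) (d : String) (e : Int) : Int :=
  pvCalcA 5 sorted_info a b c d e

-- ===== PORT B =====
def calc_py_alt (sorted_info : List (String × List (String × List (String × List (String × List Int))))) (a : String) (b : String) (c : String) (d : String) (e : Int) : Int :=
  let la := if a = "-" then pvLanguage else [a]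
  let lb := if b = "-" then pvPart else [b]
  let lc := if c = "-" then pvCareer else [c]
  let ld := if d = "-" then pvFood else [d]
  la.foldl (fun cnt x =>
    lb.foldl (fun cnt y =>
      lc.foldl (fun cnt z =>
        ld.foldl (fun cnt w => cnt + pvLeafCount sorted_info x y z w e) cnt) cnt) cnt) 0

-- ===== PRECONDITION & SPEC =====
-- Pre_ excludes exactly the inputs on which Python A raises KeyError: some reached
-- combination of (expanded) keys has no entry along the four-level dict chain.
def Pre_calc_py (sorted_info : List (String × List (String × List (String × List (String × List Int))))) (a : String) (b : String) (c : String) (d : String) (e : Int) : Prop :=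
  ∀ x ∈ (if a = "-" then pvLanguage else [a]), ∀ y ∈ (if b = "-" then pvPart else [b]),
  ∀ z ∈ (if c = "-" then pvCareer else [c]), ∀ w ∈ (if d = "-" then pvFood else [d]),
  ((sorted_info.lookup x).bind fun t => (t.lookup y).bind fun u => (u.lookup z).bind fun v => v.lookup w).isSome = true
instance (sorted_info : List (String × List (String × List (String × List (String × List Int))))) (a : String) (b : String) (c : String) (d : String) (e : Int) : Decidable (Pre_calc_py sorted_info a b c d e) := by unfold Pre_calc_py; infer_instance

def pvWitness_calc_py : (List (String × List (String × List (String × List (String × List Int))))) × String × String × String × String × Int :=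
  ([("cpp", [("backend", [("junior", [("chicken", [1, 2, 3])])])])], "cpp", "backend", "junior", "chicken", 2)

def Spec_calc_py (sorted_info : List (String × List (String × List (String × List (String × List Int))))) (a : String) (b : String) (c : String) (d : String) (e : Int) (out : Int) : Prop := out = calc_py_alt sorted_info a b c d e
instance (sorted_info : List (String × List (String × List (String × List (String × List Int))))) (a : String) (b : String) (c : String) (d : String) (e : Int) (out : Int) : Decidable (Spec_calc_py sorted_info a b c d e out) := by unfold Spec_calc_py; infer_instance

-- ===== CLAIM (what is proved, stated in full; the proofs are below) =====
def Claim_equal_calc_py : Prop := ∀ (sorted_info : List (String × List (String × List (String × List (String × List Int))))) (a : String) (b : String) (c : String) (d : String) (e : Int), Dom_calc_py sorted_info a b c d e → Pre_calc_py sorted_info a b c d e → Spec_calc_py sorted_info a b c d e (calc_py sorted_info a b c d e)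

-- ===== LEMMAS AND PROOFS =====

-- ===== VERDICT (by name: the statement is the Claim_ definition above) =====
theorem calc_py_spec : Claim_equal_calc_py := by
  intro si a b c d e _ _
  unfold Spec_calc_py calc_py calc_py_alt
  by_cases ha : a = "-" <;> by_cases hb : b = "-" <;> by_cases hc : c = "-" <;> by_cases hd : d = "-" <;>
    simp [pvCalcA, pvLanguage, pvPart, pvCareer, pvFood, ha, hb, hc, hd, List.foldl] <;> ring
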